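-- pv_equiv track=rewrite | github.com/ltskinner/date-recognizer | pipline.py | stFinder
-- ===== SOURCE A (Python) =====
-- def stFinder(text):
--     st = [
--         '1st', '2nd', '3rd', '4th', '5th', '6th', '7th', '8th', '9th', '10th',
--         '11th', '12th', '13th', '14th', '15th', '16th', '17th', '18th', '19th',
--         '20th', '21st', '22nd', '23rd', '24th', '25th', '26th', '27th', '28th', '29th', '30th', '31st'
--     ]
--
--     for i in st:
--         if i in text.lower():
--             return True
--     return False
-- ===== SOURCE B (Python) =====
-- def _suffix(n):
--     # English ordinal suffix for 1..31
--     if n % 10 == 1 and n != 11: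
--         return 'st'
--     if n % 10 == 2 and n != 12:
--         return 'nd'
--     if n % 10 == 3 and n != 13:
--         return 'rd'
--     return 'th'
--
--
-- def stFinder(text):
--     # Decode ordinals arithmetically at each position instead of scanning for
--     # each of the 31 literal strings: a position starts an ordinal iff it holds
--     # one or two digits forming 1..31 followed by that number's suffix.
--     t = text.lower()
--     n = len(t)
--     for i in range(n):
--         d = ord(t[i]) - 48
--         if 0 <= d <= 9:
--             if 1 <= d and t[i + 1:i + 3] == _suffix(d):
--                 return True
--             if i + 1 < n:
--                 d2 = ord(t[i + 1]) - 48
--                 v = d * 10 + d2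
--                 if 0 <= d2 <= 9 and 10 <= v <= 31 and t[i + 2:i + 4] == _suffix(v):
--                     return True
--     return False
-- ===== Notes on version B (the rewrite author's own statement) =====
-- stated objective: alternative
-- what changed: B decodes ordinals arithmetically in one positional scan (at each index: read one or two digits, check the value is 1..31 and that the computed English suffix follows), instead of A's 31 independent whole-text substring scans of a hard-coded list.
import Mathlib
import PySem

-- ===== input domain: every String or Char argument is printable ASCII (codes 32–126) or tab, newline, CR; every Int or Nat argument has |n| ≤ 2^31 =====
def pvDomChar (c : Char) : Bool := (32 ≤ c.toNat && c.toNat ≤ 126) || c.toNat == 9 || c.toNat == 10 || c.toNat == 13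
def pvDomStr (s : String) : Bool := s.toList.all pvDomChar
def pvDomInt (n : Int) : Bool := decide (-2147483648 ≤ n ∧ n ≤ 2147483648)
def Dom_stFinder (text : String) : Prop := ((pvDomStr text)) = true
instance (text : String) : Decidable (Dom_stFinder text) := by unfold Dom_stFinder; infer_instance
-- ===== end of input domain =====

-- B detects ordinals by arithmetic decoding (digits + computed English suffix) in one
-- positional scan, instead of A's 31 whole-text substring scans (alternative algorithm).


-- ===== PORT A =====
-- A's ordinal list literal
def stListA : List String :=
  ["1st", "2nd", "3rd", "4th", "5th", "6th", "7th", "8th", "9th", "10th",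
   "11th", "12th", "13th", "14th", "15th", "16th", "17th", "18th", "19th",
   "20th", "21st", "22nd", "23rd", "24th", "25th", "26th", "27th", "28th", "29th", "30th", "31st"]

-- 'for i in st: if i in text.lower(): return True' / 'return False'
def stFinderLoop (st : List String) (text : String) : Bool :=
  match st with
  | [] => false
  | i :: rest => if PySem.Str.isIn i (PySem.Str.lower text) then true else stFinderLoop rest text

def stFinder (text : String) : Bool := stFinderLoop stListA text

-- ===== PORT B =====
-- B's _suffix(n): English ordinal suffix as a chained early-return
def pvSuffix (n : Int) : List Char :=
  if n % 10 = 1 ∧ n ≠ 11 then ['s', 't']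
  else if n % 10 = 2 ∧ n ≠ 12 then ['n', 'd']
  else if n % 10 = 3 ∧ n ≠ 13 then ['r', 'd']
  else ['t', 'h']

-- B's loop body at index i (i < t.length): ord(t[i])-48 is (toNat : Int) - 48; the
-- slices t[i+1:i+3] / t[i+2:i+4] with in-range nonnegative bounds are drop-then-take (exact there)
def stCheckAt (t : List Char) (i : Nat) : Bool :=
  let d : Int := (t.getD i ' ').toNat - 48
  if 0 ≤ d ∧ d ≤ 9 then
    if 1 ≤ d ∧ (t.drop (i + 1)).take 2 = pvSuffix d then true
    else if i + 1 < t.length then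
      let d2 : Int := (t.getD (i + 1) ' ').toNat - 48
      let v : Int := d * 10 + d2
      decide (0 ≤ d2 ∧ d2 ≤ 9 ∧ 10 ≤ v ∧ v ≤ 31) && decide ((t.drop (i + 2)).take 2 = pvSuffix v)
    else false
  else false

-- B's 'for i in range(n)' with early return
def stFinder_alt (text : String) : Bool :=
  let t := PySem.Chars.lower text.toList
  (List.range t.length).any (fun i => stCheckAt t i)

-- ===== PRECONDITION & SPEC =====
def Spec_stFinder (text : String) (out : Bool) : Prop := out = stFinder_alt text
instance (text : String) (out : Bool) : Decidable (Spec_stFinder text out) := by unfold Spec_stFinder; infer_instance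

-- ===== CLAIM (what is proved, stated in full; the proofs are below) =====
def Claim_equal_stFinder : Prop := ∀ (text : String), Dom_stFinder text → Spec_stFinder text (stFinder text)

-- ===== LEMMAS AND PROOFS =====

-- A's early-return loop is an 'any' over its list
theorem stFinderLoop_eq_any (st : List String) (text : String) :
    stFinderLoop st text = st.any (fun i => PySem.Str.isIn i (PySem.Str.lower text)) := by
  induction st with
  | nil => rfl
  | cons i rest ih =>
    simp only [stFinderLoop, List.any_cons]
    by_cases h : PySem.Str.isIn i (PySem.Str.lower text) = true <;> simp [ih]

-- positional prefix scan for a fixed nonempty pattern = Python's 'o in s'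
theorem range_startswith_eq_isIn (s o : List Char) (ho : o ≠ []) :
    (List.range s.length).any (fun i => PySem.Chars.startswith (s.drop i) o)
      = PySem.Chars.isIn o s := by
  rw [Bool.eq_iff_iff]
  simp only [List.any_eq_true, List.mem_range, PySem.Chars.startswith,
    List.isPrefixOf_iff_prefix]
  rw [← PySem.Chars.exists_prefix_drop_iff_isIn]
  constructor
  · rintro ⟨i, _, h⟩; exact ⟨i, h⟩
  · rintro ⟨j, h⟩
    by_cases hj : j < s.length
    · exact ⟨j, hj, h⟩
    · exfalso
      rw [List.drop_eq_nil_of_le (by omega)] at h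
      exact ho (List.prefix_nil.mp h)

-- proof-side version of B's per-index check, acting on the suffix t.drop i
def stCheckS : List Char → Bool
  | [] => false
  | c :: rest =>
    if 0 ≤ (c.toNat : Int) - 48 ∧ (c.toNat : Int) - 48 ≤ 9 then
      if 1 ≤ (c.toNat : Int) - 48 ∧ rest.take 2 = pvSuffix ((c.toNat : Int) - 48) then true
      else
        match rest with
        | [] => false
        | c2 :: rest2 =>
          decide (0 ≤ (c2.toNat : Int) - 48 ∧ (c2.toNat : Int) - 48 ≤ 9 ∧
                  10 ≤ ((c.toNat : Int) - 48) * 10 + ((c2.toNat : Int) - 48) ∧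
                  ((c.toNat : Int) - 48) * 10 + ((c2.toNat : Int) - 48) ≤ 31) &&
          decide (rest2.take 2 = pvSuffix (((c.toNat : Int) - 48) * 10 + ((c2.toNat : Int) - 48)))
    else false

theorem stCheckAt_succ (c : Char) (t : List Char) (i : Nat) :
    stCheckAt (c :: t) (i + 1) = stCheckAt t i := by
  simp [stCheckAt]

theorem stCheckAt_zero (t : List Char) (ht : t ≠ []) : stCheckAt t 0 = stCheckS t := by
  match t with
  | [] => exact absurd rfl ht
  | c :: rest =>
    match rest with
    | [] => simp [stCheckAt, stCheckS]
    | c2 :: rest2 => simp [stCheckAt, stCheckS]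

-- B's check fires exactly where one of A's 31 ordinal strings starts
theorem stCheckS_iff (s : List Char) :
    stCheckS s = true ↔ ∃ o ∈ stListA, o.toList <+: s := by
  constructor
  · intro h
    match s with
    | [] => simp [stCheckS] at h
    | c :: rest =>
      simp only [stCheckS] at h
      split_ifs at h with h1 h2
      · -- one-digit ordinal at the head
        obtain ⟨k, hc, hk1, hk2⟩ : ∃ k, c = Char.ofNat k ∧ 49 ≤ k ∧ k ≤ 57 :=
          ⟨c.toNat, (Char.ofNat_toNat c).symm, by omega, by omega⟩
        interval_cases k <;>
          · refine ⟨String.ofList (c :: rest.take 2), ?_, ?_⟩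
            · rw [h2.2, hc]; decide
            · simp [List.take_prefix]
      · -- two-digit ordinal at the head
        match rest with
        | [] => simp at h
        | c2 :: rest2 =>
          simp only [Bool.and_eq_true, decide_eq_true_eq] at h
          obtain ⟨⟨hd2a, hd2b, hv1, hv2⟩, htake⟩ := h
          obtain ⟨k, hc, hk1, hk2⟩ : ∃ k, c = Char.ofNat k ∧ 49 ≤ k ∧ k ≤ 51 :=
            ⟨c.toNat, (Char.ofNat_toNat c).symm, by omega, by omega⟩
          obtain ⟨k2, hc2, hk21, hk22⟩ : ∃ k2, c2 = Char.ofNat k2 ∧ 48 ≤ k2 ∧ k2 ≤ 57 :=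
            ⟨c2.toNat, (Char.ofNat_toNat c2).symm, by omega, by omega⟩
          interval_cases k <;> interval_cases k2 <;>
            first
            | (exfalso; rw [hc, hc2] at hv1 hv2; revert hv1 hv2; decide)
            | · refine ⟨String.ofList (c :: c2 :: rest2.take 2), ?_, ?_⟩
                · rw [htake, hc, hc2]; decide
                · simp [List.take_prefix]
  · rintro ⟨o, ho, hpre⟩
    fin_cases ho <;>
      · obtain ⟨r, rfl⟩ := hpre
        simp [stCheckS, pvSuffix]
-- B's per-index check equals the proof-side suffix check
theorem stCheckAt_eq_drop (t : List Char) (i : Nat) (hi : i < t.length) :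
    stCheckAt t i = stCheckS (t.drop i) := by
  induction t generalizing i with
  | nil => simp at hi
  | cons c rest ih =>
    match i with
    | 0 => exact stCheckAt_zero (c :: rest) (by simp)
    | j + 1 =>
      rw [stCheckAt_succ, List.drop_succ_cons]
      exact ih j (by simpa using hi)

-- the suffix check as an 'any' over A's ordinal list
theorem checkS_eq_any (s : List Char) :
    stCheckS s = stListA.any (fun o => PySem.Chars.startswith s o.toList) := by
  rw [Bool.eq_iff_iff]
  simp only [List.any_eq_true, PySem.Chars.startswith, List.isPrefixOf_iff_prefix]
  exact stCheckS_iff s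

-- ===== VERDICT (by name: the statement is the Claim_ definition above) =====
theorem stFinder_spec : Claim_equal_stFinder := by
  intro text _
  show stFinder text = stFinder_alt text
  unfold stFinder stFinder_alt
  rw [stFinderLoop_eq_any]
  have h1 : ∀ o ∈ stListA, PySem.Str.isIn o (PySem.Str.lower text)
      = (List.range (PySem.Chars.lower text.toList).length).any
          (fun i => PySem.Chars.startswith ((PySem.Chars.lower text.toList).drop i) o.toList) := by
    intro o ho
    rw [range_startswith_eq_isIn _ o.toList (by fin_cases ho <;> decide)]
    simp [PySem.Str.isIn, PySem.Str.lower]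
  rw [Bool.eq_iff_iff]
  simp only [List.any_eq_true, List.mem_range]
  constructor
  · rintro ⟨o, ho, h⟩
    rw [h1 o ho] at h
    simp only [List.any_eq_true, List.mem_range] at h
    obtain ⟨i, hi, hsw⟩ := h
    exact ⟨i, hi, by
      rw [stCheckAt_eq_drop _ _ hi, checkS_eq_any]
      exact List.any_eq_true.mpr ⟨o, ho, hsw⟩⟩
  · rintro ⟨i, hi, h⟩
    rw [stCheckAt_eq_drop _ _ hi, checkS_eq_any] at h
    obtain ⟨o, ho, hsw⟩ := List.any_eq_true.mp h
    refine ⟨o, ho, ?_⟩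
    rw [h1 o ho]
    simp only [List.any_eq_true, List.mem_range]
    exact ⟨i, hi, hsw⟩
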